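-- pv_equiv track=rewrite | github.com/duriantaco/skylos | skylos/agent_center.py | detect_changed_files
-- ===== SOURCE A (Python) =====
-- def detect_changed_files(
--     previous: dict[str, dict[str, int]] | None,
--     current: dict[str, dict[str, int]],
-- ) -> list[str]:
--     if not previous:
--         return sorted(current.keys())
--
--     changed: set[str] = set()
--     for rel_path, signature in current.items():
--         if previous.get(rel_path) != signature:
--             changed.add(rel_path)
--     for rel_path in previous:
--         if rel_path not in current:
--             changed.add(rel_path)
--     return sorted(changed)
-- ===== SOURCE B (Python) =====
-- def detect_changed_files(
--     previous: dict[str, dict[str, int]] | None,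
--     current: dict[str, dict[str, int]],
-- ) -> list[str]:
--     if not previous:
--         return sorted(current.keys())
--     pk = sorted(previous)
--     ck = sorted(current)
--     out: list[str] = []
--     i = j = 0
--     while i < len(pk) and j < len(ck):
--         if pk[i] < ck[j]:
--             out.append(pk[i])
--             i += 1
--         elif ck[j] < pk[i]:
--             out.append(ck[j])
--             j += 1
--         else:
--             if previous[pk[i]] != current[ck[j]]:
--                 out.append(pk[i])
--             i += 1
--             j += 1
--     out.extend(pk[i:])
--     out.extend(ck[j:])
--     return out
-- ===== Notes on version B (the rewrite author's own statement) =====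
-- stated objective: alternative
-- what changed: A builds a hash-backed 'changed' set with two directional loops (scan current comparing signatures, scan previous for deletions) and sorts it at the end; B sorts the two key lists first and runs a two-pointer merge over them, emitting one-sided keys and equal keys with differing signatures already in sorted order, with no set and no final sort.
import Mathlib
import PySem

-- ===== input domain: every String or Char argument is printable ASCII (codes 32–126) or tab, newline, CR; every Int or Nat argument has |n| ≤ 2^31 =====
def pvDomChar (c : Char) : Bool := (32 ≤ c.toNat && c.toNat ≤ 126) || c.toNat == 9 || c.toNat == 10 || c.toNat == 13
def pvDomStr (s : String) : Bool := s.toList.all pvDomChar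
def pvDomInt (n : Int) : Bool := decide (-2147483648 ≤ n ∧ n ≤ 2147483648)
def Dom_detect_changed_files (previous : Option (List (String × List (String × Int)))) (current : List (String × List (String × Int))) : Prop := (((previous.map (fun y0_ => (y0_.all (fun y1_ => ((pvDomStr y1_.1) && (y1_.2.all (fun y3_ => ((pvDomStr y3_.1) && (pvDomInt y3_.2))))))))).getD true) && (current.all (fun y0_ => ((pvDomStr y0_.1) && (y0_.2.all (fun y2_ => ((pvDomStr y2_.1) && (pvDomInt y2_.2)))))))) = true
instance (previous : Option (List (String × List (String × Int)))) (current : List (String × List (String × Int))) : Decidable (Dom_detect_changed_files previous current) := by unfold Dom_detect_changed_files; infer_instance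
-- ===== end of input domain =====

-- B replaces A's hash-scan-then-sort (two directional loops building a set, sorted at the end)
-- with a sort-then-two-pointer-merge over the two sorted key lists that emits the changed keys
-- already in order (alternative algorithm, same asymptotic cost).


-- ===== PORT A =====
-- shared helper: the Python dict the association list denotes (duplicate keys: last value wins, like dict())
def pvToDict (l : List (String × List (String × Int))) : PySem.Dict String (PySem.Dict String Int) :=
  PySem.Dict.ofList (l.map (fun p => (p.1, PySem.Dict.ofList p.2)))

-- shared helper: Python's '==' on dicts (order-insensitive: same key set, same value at each key)
def pvDictEq (a b : PySem.Dict String Int) : Bool :=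
  PySem.Set.equal (PySem.Set.ofList a.keys) (PySem.Set.ofList b.keys) && a.keys.all (fun k => a.get? k == b.get? k)

-- Python's 'previous.get(rel_path) != signature' (None on a missing key never equals a dict)
def pvGetNeq (o : Option (PySem.Dict String Int)) (sig : PySem.Dict String Int) : Bool :=
  match o with
  | some d => !(pvDictEq d sig)
  | none => true

def detect_changed_files (previous : Option (List (String × List (String × Int)))) (current : List (String × List (String × Int))) : List String :=
  let curD := pvToDict current
  match previous with
  | none => PySem.List.sorted curD.keys (fun x => x) false
  | some prevL =>
    let prevD := pvToDict prevL
    if prevD.size = 0 then PySem.List.sorted curD.keys (fun x => x) false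
    else
      let changed : PySem.Set String :=
        curD.items.foldl (fun s p => if pvGetNeq (prevD.get? p.1) p.2 then PySem.Set.add s p.1 else s) PySem.Set.empty
      let changed := prevD.keys.foldl (fun s k => if curD.contains k then s else PySem.Set.add s k) changed
      PySem.List.sorted changed (fun x => x) false

-- ===== PORT B =====
-- B's 'previous[k] != current[k]' at an equal key during the merge; both lookups are 'some'
-- there (the key came from both sorted key lists), so the option match is Python's indexing.
def pvOptDictNeq (o1 o2 : Option (PySem.Dict String Int)) : Bool :=
  match o1, o2 with
  | some d1, some d2 => !(pvDictEq d1 d2)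
  | none, none => false
  | _, _ => true

-- B's while-loop: two pointers over the two sorted key lists (tails = pk[i:], ck[j:]);
-- the trailing out.extend(pk[i:]) / out.extend(ck[j:]) are the base cases.
def pvMergeChanged (neq : String → Bool) : List String → List String → List String
  | [], ck => ck
  | p :: ps, [] => p :: ps
  | p :: ps, c :: cs =>
    if p < c then p :: pvMergeChanged neq ps (c :: cs)
    else if c < p then c :: pvMergeChanged neq (p :: ps) cs
    else if neq p then p :: pvMergeChanged neq ps cs
    else pvMergeChanged neq ps cs
  termination_by pk ck => pk.length + ck.length

def detect_changed_files_alt (previous : Option (List (String × List (String × Int)))) (current : List (String × List (String × Int))) : List String :=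
  let curD := pvToDict current
  match previous with
  | none => PySem.List.sorted curD.keys (fun x => x) false
  | some prevL =>
    let prevD := pvToDict prevL
    if prevD.size = 0 then PySem.List.sorted curD.keys (fun x => x) false
    else
      pvMergeChanged (fun k => pvOptDictNeq (prevD.get? k) (curD.get? k))
        (PySem.List.sorted prevD.keys (fun x => x) false)
        (PySem.List.sorted curD.keys (fun x => x) false)

-- ===== PRECONDITION & SPEC =====
def Spec_detect_changed_files (previous : Option (List (String × List (String × Int)))) (current : List (String × List (String × Int))) (out : List String) : Prop := out = detect_changed_files_alt previous current
instance (previous : Option (List (String × List (String × Int)))) (current : List (String × List (String × Int))) (out : List String) : Decidable (Spec_detect_changed_files previous current out) := by unfold Spec_detect_changed_files; infer_instance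

-- ===== CLAIM (what is proved, stated in full; the proofs are below) =====
def Claim_equal_detect_changed_files : Prop := ∀ (previous : Option (List (String × List (String × Int)))) (current : List (String × List (String × Int))), Dom_detect_changed_files previous current → Spec_detect_changed_files previous current (detect_changed_files previous current)

-- ===== LEMMAS AND PROOFS =====

-- A's first loop: membership in the accumulated set
theorem mem_foldl_loop1 (l : List (String × PySem.Dict String Int)) (f : String × PySem.Dict String Int → Bool)
    (s : PySem.Set String) (k : String) :
    k ∈ l.foldl (fun s p => if f p then PySem.Set.add s p.1 else s) s ↔
      k ∈ s ∨ ∃ p ∈ l, p.1 = k ∧ f p = true := by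
  induction l generalizing s with
  | nil => simp
  | cons h t ih =>
    by_cases hf : f h = true <;>
      simp only [List.foldl_cons, ih, hf, if_true, PySem.Set.mem_add, List.mem_cons] <;>
      aesop

-- A's second loop: membership in the accumulated set
theorem mem_foldl_loop2 (l : List String) (c : String → Bool) (s : PySem.Set String) (k : String) :
    k ∈ l.foldl (fun s k' => if c k' then s else PySem.Set.add s k') s ↔
      k ∈ s ∨ (k ∈ l ∧ c k = false) := by
  induction l generalizing s with
  | nil => simp
  | cons h t ih =>
    by_cases hc : c h = true <;>
      simp only [List.foldl_cons, ih, hc, if_true, List.mem_cons] <;>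
      aesop

theorem nodup_foldl_loop1 (l : List (String × PySem.Dict String Int)) (f : String × PySem.Dict String Int → Bool)
    (s : PySem.Set String) (hs : s.Nodup) :
    (l.foldl (fun s p => if f p then PySem.Set.add s p.1 else s) s).Nodup := by
  induction l generalizing s with
  | nil => exact hs
  | cons h t ih =>
    simp only [List.foldl_cons]
    apply ih
    split
    · exact PySem.Set.nodup_add _ _ hs
    · exact hs

theorem nodup_foldl_loop2 (l : List String) (c : String → Bool) (s : PySem.Set String) (hs : s.Nodup) :
    (l.foldl (fun s k' => if c k' then s else PySem.Set.add s k') s).Nodup := by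
  induction l generalizing s with
  | nil => exact hs
  | cons h t ih =>
    simp only [List.foldl_cons]
    apply ih
    split
    · exact hs
    · exact PySem.Set.nodup_add _ _ hs

-- elements of the merge come from the two input lists
theorem mem_merge_sub (neq : String → Bool) (pk ck : List String) (k : String)
    (h : k ∈ pvMergeChanged neq pk ck) : k ∈ pk ∨ k ∈ ck := by
  fun_induction pvMergeChanged neq pk ck <;> aesop

-- the merge of two strictly increasing lists is strictly increasing
theorem pairwise_merge (neq : String → Bool) (pk ck : List String)
    (hp : pk.Pairwise (· < ·)) (hc : ck.Pairwise (· < ·)) :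
    (pvMergeChanged neq pk ck).Pairwise (· < ·) := by
  fun_induction pvMergeChanged neq pk ck with
  | case1 => exact hc
  | case2 => exact hp
  | case3 p ps c cs hlt ih =>
    rw [List.pairwise_cons] at hp ⊢
    refine ⟨fun y hy => ?_, ih hp.2 hc⟩
    rcases mem_merge_sub _ _ _ _ hy with h | h
    · exact hp.1 y h
    · rcases List.mem_cons.mp h with rfl | h
      · exact hlt
      · exact lt_trans hlt ((List.pairwise_cons.mp hc).1 y h)
  | case4 p ps c cs hlt hlt2 ih =>
    rw [List.pairwise_cons] at hc ⊢
    refine ⟨fun y hy => ?_, ih hp hc.2⟩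
    rcases mem_merge_sub _ _ _ _ hy with h | h
    · rcases List.mem_cons.mp h with rfl | h
      · exact hlt2
      · exact lt_trans hlt2 ((List.pairwise_cons.mp hp).1 y h)
    · exact hc.1 y h
  | case5 p ps c cs hlt hlt2 hneq ih =>
    have heq : p = c := le_antisymm (not_lt.mp hlt2) (not_lt.mp hlt)
    subst heq
    rw [List.pairwise_cons] at hp hc ⊢
    refine ⟨fun y hy => ?_, ih hp.2 hc.2⟩
    rcases mem_merge_sub _ _ _ _ hy with h | h
    · exact hp.1 y h
    · exact hc.1 y h
  | case6 p ps c cs hlt hlt2 hneq ih =>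
    exact ih (List.pairwise_cons.mp hp).2 (List.pairwise_cons.mp hc).2

-- membership in the merge of two strictly increasing lists
theorem mem_merge (neq : String → Bool) (pk ck : List String)
    (hp : pk.Pairwise (· < ·)) (hc : ck.Pairwise (· < ·)) (k : String) :
    k ∈ pvMergeChanged neq pk ck ↔
      (k ∈ pk ∧ k ∉ ck) ∨ (k ∉ pk ∧ k ∈ ck) ∨ (k ∈ pk ∧ k ∈ ck ∧ neq k = true) := by
  fun_induction pvMergeChanged neq pk ck with
  | case1 ck => simp
  | case2 p ps => simp
  | case3 p ps c cs hlt ih =>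
    rw [List.pairwise_cons] at hp
    have hpc : p ∉ c :: cs := by
      intro hmem
      rcases List.mem_cons.mp hmem with rfl | h
      · exact lt_irrefl p hlt
      · exact lt_irrefl p (lt_trans hlt ((List.pairwise_cons.mp hc).1 p h))
    have hps : p ∉ ps := fun h => lt_irrefl p (hp.1 p h)
    rcases eq_or_ne k p with rfl | hne
    · simp [hpc, hps]
    · simp only [List.mem_cons, ih hp.2 hc]
      aesop
  | case4 p ps c cs hlt hlt2 ih =>
    rw [List.pairwise_cons] at hc
    have hcp : c ∉ p :: ps := by
      intro hmem
      rcases List.mem_cons.mp hmem with rfl | h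
      · exact lt_irrefl c hlt2
      · exact lt_irrefl c (lt_trans hlt2 ((List.pairwise_cons.mp hp).1 c h))
    have hcs : c ∉ cs := fun h => lt_irrefl c (hc.1 c h)
    rcases eq_or_ne k c with rfl | hne
    · simp [hcp, hcs]
    · simp only [List.mem_cons, ih hp hc.2]
      aesop
  | case5 p ps c cs hlt hlt2 hneq ih =>
    have heq : p = c := le_antisymm (not_lt.mp hlt2) (not_lt.mp hlt)
    subst heq
    rw [List.pairwise_cons] at hp hc
    have hps : p ∉ ps := fun h => lt_irrefl p (hp.1 p h)
    have hcs : p ∉ cs := fun h => lt_irrefl p (hc.1 p h)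
    rcases eq_or_ne k p with rfl | hne
    · simp [hps, hcs, hneq]
    · simp only [List.mem_cons, ih hp.2 hc.2]
      aesop
  | case6 p ps c cs hlt hlt2 hneq ih =>
    have heq : p = c := le_antisymm (not_lt.mp hlt2) (not_lt.mp hlt)
    subst heq
    rw [List.pairwise_cons] at hp hc
    have hps : p ∉ ps := fun h => lt_irrefl p (hp.1 p h)
    have hcs : p ∉ cs := fun h => lt_irrefl p (hc.1 p h)
    rcases eq_or_ne k p with rfl | hne
    · simp [hps, hcs, hneq, ih hp.2 hc.2]
    · simp only [List.mem_cons, ih hp.2 hc.2]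
      aesop

-- sorted with the identity key on a duplicate-free list is strictly increasing
theorem sorted_nodup_pairwise_lt (xs : List String) (hx : xs.Nodup) :
    (PySem.List.sorted xs (fun x => x) false).Pairwise (· < ·) := by
  have hle := PySem.List.sorted_pairwise xs (fun x => x)
  have hnd : (PySem.List.sorted xs (fun x => x) false).Nodup :=
    (PySem.List.sorted_perm xs (fun x => x) false).nodup_iff.mpr hx
  exact hle.imp₂ (fun a b hab hne => lt_of_le_of_ne hab hne) hnd

theorem detect_changed_files_spec_aux (prevL current : List (String × List (String × Int))) :
    detect_changed_files (some prevL) current = detect_changed_files_alt (some prevL) current := by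
  simp only [detect_changed_files, detect_changed_files_alt]
  split
  · rfl
  · set prevD := pvToDict prevL with hprevD
    set curD := pvToDict current with hcurD
    have hpnd : prevD.keys.Nodup := PySem.Dict.nodup_keys_ofList _
    have hcnd : curD.keys.Nodup := PySem.Dict.nodup_keys_ofList _
    have hppw := sorted_nodup_pairwise_lt prevD.keys hpnd
    have hcpw := sorted_nodup_pairwise_lt curD.keys hcnd
    apply PySem.List.sorted_eq_of_perm_of_pairwise_lt
    · -- the merge result is a permutation of A's accumulated set
      rw [List.perm_ext_iff_of_nodup]
      · intro k
        rw [mem_merge _ _ _ hppw hcpw, mem_foldl_loop2, mem_foldl_loop1]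
        have hemp : (PySem.Set.empty : PySem.Set String) = [] := rfl
        simp only [hemp, List.not_mem_nil, false_or,
          PySem.List.mem_sorted]
        constructor
        · rintro (⟨hkp, hkc⟩ | ⟨hkp, hkc⟩ | ⟨hkp, hkc, hneq⟩)
          · -- only in previous: A's second loop adds it
            refine Or.inr ⟨hkp, ?_⟩
            simp only [PySem.Dict.contains_eq_decide_mem_keys, decide_eq_false_iff_not]
            exact hkc
          · -- only in current: A's first loop adds it (prev.get = none)
            have hsome : (curD.get? k).isSome = true := by
              cases hcur : curD.get? k with
              | none => exact absurd ((PySem.Dict.get?_eq_none_iff_not_mem_keys _ _).mp hcur) (by simpa using hkc)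
              | some d => rfl
            obtain ⟨v, hv⟩ := Option.isSome_iff_exists.mp hsome
            refine Or.inl ⟨(k, v), (PySem.Dict.get?_eq_some_iff_mem_items _ _ _ hcnd).mp hv, rfl, ?_⟩
            have hprev : prevD.get? k = none :=
              (PySem.Dict.get?_eq_none_iff_not_mem_keys _ _).mpr hkp
            simp [hprev, pvGetNeq]
          · -- in both with different signatures
            have hsome : (curD.get? k).isSome = true := by
              cases hcur : curD.get? k with
              | none => exact absurd ((PySem.Dict.get?_eq_none_iff_not_mem_keys _ _).mp hcur) (by simpa using hkc)
              | some d => rfl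
            obtain ⟨v, hv⟩ := Option.isSome_iff_exists.mp hsome
            refine Or.inl ⟨(k, v), (PySem.Dict.get?_eq_some_iff_mem_items _ _ _ hcnd).mp hv, rfl, ?_⟩
            cases hprev : prevD.get? k with
            | none => simp [pvGetNeq]
            | some d =>
              rw [hprev, hv] at hneq
              simpa [pvGetNeq, pvOptDictNeq] using hneq
        · rintro (⟨p, hp, rfl, hneq⟩ | ⟨hkp, hkc⟩)
          · have hget : curD.get? p.1 = some p.2 :=
              (PySem.Dict.get?_eq_some_iff_mem_items _ _ _ hcnd).mpr hp
            have hkc : p.1 ∈ curD.keys := PySem.Dict.mem_keys_of_mem_items _ hp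
            cases hprev : prevD.get? p.1 with
            | none =>
              have hkp : p.1 ∉ prevD.keys := (PySem.Dict.get?_eq_none_iff_not_mem_keys _ _).mp hprev
              exact Or.inr (Or.inl ⟨hkp, hkc⟩)
            | some d =>
              have hkp : p.1 ∈ prevD.keys := by
                by_contra hnm
                rw [(PySem.Dict.get?_eq_none_iff_not_mem_keys _ _).mpr hnm] at hprev
                simp at hprev
              refine Or.inr (Or.inr ⟨hkp, hkc, ?_⟩)
              rw [hprev] at hneq
              rw [hget]
              simpa [pvGetNeq, pvOptDictNeq] using hneq
          · have hknc : k ∉ curD.keys := by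
              simpa [PySem.Dict.contains_eq_decide_mem_keys] using hkc
            exact Or.inl ⟨hkp, hknc⟩
      · exact (pairwise_merge _ _ _ hppw hcpw).nodup
      · exact nodup_foldl_loop2 _ _ _ (nodup_foldl_loop1 _ _ _ List.nodup_nil)
    · exact pairwise_merge _ _ _ hppw hcpw

-- ===== VERDICT (by name: the statement is the Claim_ definition above) =====
theorem detect_changed_files_spec : Claim_equal_detect_changed_files := by
  intro previous current _
  unfold Spec_detect_changed_files
  cases previous with
  | none => rfl
  | some prevL => exact detect_changed_files_spec_aux prevL current
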